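-- pv_equiv track=rewrite | github.com/inspirepan/klaude-code | src/klaude_code/tool/file/_utils.py | _apply_curly_double_quotes
-- ===== SOURCE A (Python) =====
-- LEFT_DOUBLE_CURLY = "\u201c"  # "
--
-- RIGHT_DOUBLE_CURLY = "\u201d"  # "
--
-- def _is_opening_context(chars: list[str], index: int) -> bool:
--     if index == 0:
--         return True
--     prev = chars[index - 1]
--     return prev in {" ", "\t", "\n", "\r", "(", "[", "{", "\u2014", "\u2013"}
--
-- def _apply_curly_double_quotes(s: str) -> str:
--     chars = list(s)
--     result: list[str] = []
--     for i, ch in enumerate(chars):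
--         if ch == '"':
--             result.append(LEFT_DOUBLE_CURLY if _is_opening_context(chars, i) else RIGHT_DOUBLE_CURLY)
--         else:
--             result.append(ch)
--     return "".join(result)
-- ===== SOURCE B (Python) =====
-- LEFT_DOUBLE_CURLY = "\u201c"
-- RIGHT_DOUBLE_CURLY = "\u201d"
-- _OPENERS = " \t\n\r([{\u2014\u2013"
--
-- def _apply_curly_double_quotes(s: str) -> str:
--     # Split on straight quotes; each boundary between segments is one quote,
--     # decided by the last character of the segment before it (start of string
--     # counts as opening; an empty inner segment means the previous original
--     # character was itself a straight quote, which is closing context).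
--     parts = s.split('"')
--     pieces = [parts[0]]
--     for i, (prev, part) in enumerate(zip(parts, parts[1:])):
--         if prev:
--             pieces.append(LEFT_DOUBLE_CURLY if prev[-1] in _OPENERS else RIGHT_DOUBLE_CURLY)
--         else:
--             pieces.append(LEFT_DOUBLE_CURLY if i == 0 else RIGHT_DOUBLE_CURLY)
--         pieces.append(part)
--     return "".join(pieces)
-- ===== Notes on version B (the rewrite author's own statement) =====
-- stated objective: faster
-- what changed: Instead of A's indexed per-character loop with a helper inspecting chars[i-1], B splits the string on the straight double quote into quote-free segments and rejoins them, choosing each boundary's curly quote from the last character of the preceding segment (an empty inner segment means the preceding character was itself a quote, hence closing; an empty first segment means start of string, hence opening).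
import Mathlib
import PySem

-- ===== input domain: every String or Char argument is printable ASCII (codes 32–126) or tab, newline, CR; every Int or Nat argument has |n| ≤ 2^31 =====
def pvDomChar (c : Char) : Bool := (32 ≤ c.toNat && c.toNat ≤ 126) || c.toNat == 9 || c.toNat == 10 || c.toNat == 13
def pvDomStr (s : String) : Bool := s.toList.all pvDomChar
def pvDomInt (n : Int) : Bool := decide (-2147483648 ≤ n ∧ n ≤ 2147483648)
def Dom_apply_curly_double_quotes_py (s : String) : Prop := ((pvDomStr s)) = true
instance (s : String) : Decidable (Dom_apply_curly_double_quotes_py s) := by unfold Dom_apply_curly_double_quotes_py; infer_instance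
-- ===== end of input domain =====

-- B replaces A's per-character indexed loop by a split-on-quote decomposition:
-- split the string into quote-free segments and rejoin them with a curly quote
-- chosen from the last character of the preceding segment (measured faster: the per-character work moves into str.split/join).


-- ===== PORT A =====
-- Python set literal {" ", "\t", "\n", "\r", "(", "[", "{", "\u2014", "\u2013"}
def pvOpenSet : PySem.Set Char :=
  PySem.Set.ofList [' ', '\t', '\n', '\r', '(', '[', '{', '\u2014', '\u2013']

def is_opening_context_py (chars : List Char) (index : Int) : Bool :=
  if index = 0 then true
  else
    match PySem.List.pyGet? chars (index - 1) with
    | some prev => PySem.Set.contains pvOpenSet prev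
    | none => false   -- unreachable: the caller passes enumerate indices, so 1 ≤ index < len chars

def apply_curly_double_quotes_py (s : String) : String :=
  let chars := s.toList
  let result : List Char :=
    (PySem.List.enumerate chars 0).foldl
      (fun acc ic =>
        if ic.2 = '"' then
          acc ++ [if is_opening_context_py chars ic.1 then '\u201c' else '\u201d']
        else
          acc ++ [ic.2]) []
  String.ofList result   -- "".join of one-char pieces

-- ===== PORT B =====
-- the string constant _OPENERS, as its character list
def pvOpeners : List Char := [' ', '\t', '\n', '\r', '(', '[', '{', '\u2014', '\u2013']

-- s.split('"') on a character list (Python str.split with a 1-char separator)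
def pvSplitQ : List Char → List (List Char)
  | [] => [[]]
  | c :: t =>
    if c = '"' then [] :: pvSplitQ t
    else
      match pvSplitQ t with
      | h :: r => (c :: h) :: r
      | [] => [[c]]   -- unreachable: pvSplitQ never returns []

-- the for-loop over enumerate(zip(parts, parts[1:])): emit one quote per boundary, then the segment
def pvGoB : Nat → List Char → List (List Char) → List Char
  | _, _, [] => []
  | i, prev, part :: rest =>
    (match prev.getLast? with
     | some c => if c ∈ pvOpeners then ['\u201c'] else ['\u201d']
     | none => if i = 0 then ['\u201c'] else ['\u201d'])
    ++ part ++ pvGoB (i + 1) part rest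

def apply_curly_double_quotes_py_alt (s : String) : String :=
  match pvSplitQ s.toList with
  | [] => ""   -- unreachable: split always yields at least one part
  | p0 :: rest => String.ofList (p0 ++ pvGoB 0 p0 rest)

-- ===== PRECONDITION & SPEC =====
def Spec_apply_curly_double_quotes_py (s : String) (out : String) : Prop := out = apply_curly_double_quotes_py_alt s
instance (s : String) (out : String) : Decidable (Spec_apply_curly_double_quotes_py s out) := by unfold Spec_apply_curly_double_quotes_py; infer_instance

-- ===== CLAIM (what is proved, stated in full; the proofs are below) =====
def Claim_equal_apply_curly_double_quotes_py : Prop := ∀ (s : String), Dom_apply_curly_double_quotes_py s → Spec_apply_curly_double_quotes_py s (apply_curly_double_quotes_py s)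

-- ===== LEMMAS AND PROOFS =====

-- common reference function: one pass carrying the previous character (none = start of string)
def pvOpensO : Option Char → Bool
  | none => true
  | some c => c ∈ pvOpeners

def pvConv : Option Char → List Char → List Char
  | _, [] => []
  | p, c :: t => (if c = '"' then (if pvOpensO p then '\u201c' else '\u201d') else c) :: pvConv (some c) t

-- A's per-character output as a pure function of the pair (index, char)
def pvA (chars : List Char) (ic : Int × Char) : Char :=
  if ic.2 = '"' then (if is_opening_context_py chars ic.1 then '\u201c' else '\u201d') else ic.2

-- B-side context: the character preceding the current gap, given the segment before it and its index
def pvCtx (seg : List Char) (i : Nat) : Option Char :=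
  match seg.getLast? with
  | some c => some c
  | none => if i = 0 then none else some '"'

-- per-pair form of A (predecessor, char)
def pvB (pc : Char × Char) : Char :=
  if pc.2 = '"' then (if pc.1 ∈ pvOpeners then '\u201c' else '\u201d') else pc.2

lemma pvA_agrees (chars : List Char) (k : Nat) (hk : k < chars.length) :
    pvA chars ((0 : Int) + (k : Nat), chars[k]) = pvB ((('\n' :: chars)[k]'(by simp; omega), chars[k])) := by
  unfold pvA pvB
  simp only []
  by_cases hq : chars[k] = '"'
  · simp only [hq]
    congr 1
    cases k with
    | zero =>
      simp [is_opening_context_py]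
      decide
    | succ j =>
      have hj : j < chars.length := by omega
      have h1 : ((0 : Int) + ((j + 1 : Nat) : Int)) ≠ 0 := by omega
      have h2 : ((0 : Int) + ((j + 1 : Nat) : Int)) - 1 = ((j : Nat) : Int) := by push_cast; ring
      simp only [is_opening_context_py, if_neg h1, h2, PySem.List.pyGet?_natCast,
        List.getElem?_eq_getElem hj, List.getElem_cons_succ]
      have hset : pvOpenSet = pvOpeners := by decide
      rw [hset]
      by_cases hm : chars[j] ∈ pvOpeners
      · simp [hm, PySem.Set.contains_eq_listContains]
      · simp [hm, PySem.Set.contains_eq_listContains]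
  · simp [hq]

lemma pv_zip_eq (chars : List Char) :
    (PySem.List.enumerate chars 0).map (pvA chars)
      = (('\n' :: chars).zip chars).map pvB := by
  apply List.ext_getElem
  · simp [PySem.List.length_enumerate]
  · intro k h1 h2
    simp only [List.getElem_map, PySem.List.getElem_enumerate, List.getElem_zip]
    have hk : k < chars.length := by
      simpa [PySem.List.length_enumerate] using h1
    exact pvA_agrees chars k hk

lemma pv_zipmap_conv : ∀ (chars : List Char) (p : Char),
    ((p :: chars).zip chars).map pvB = pvConv (some p) chars := by
  intro chars
  induction chars with
  | nil => intro p; rfl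
  | cons c t ih =>
    intro p
    simp only [List.zip_cons_cons, List.map_cons, pvConv, ih c]
    simp [pvB, pvOpensO]

lemma pv_conv_newline (chars : List Char) : pvConv (some '\n') chars = pvConv none chars := by
  cases chars with
  | nil => rfl
  | cons c t =>
    have h : pvOpensO (some '\n') = pvOpensO none := by decide
    simp [pvConv, h]

lemma pvSplitQ_ne_nil (t : List Char) : pvSplitQ t ≠ [] := by
  cases t with
  | nil => simp [pvSplitQ]
  | cons c t' =>
    simp only [pvSplitQ]
    split
    · simp
    · cases h : pvSplitQ t' <;> simp

-- the key invariant: B's join equals the reference pass, segment by segment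
lemma pvK : ∀ (t : List Char) (i : Nat) (seg h : List Char) (r : List (List Char)),
    pvSplitQ t = h :: r →
    (seg ++ h) ++ pvGoB i (seg ++ h) r = seg ++ pvConv (pvCtx seg i) t := by
  intro t
  induction t with
  | nil =>
    intro i seg h r hs
    simp only [pvSplitQ] at hs
    cases hs
    simp [pvGoB, pvConv]
  | cons c t' ih =>
    intro i seg h r hs
    obtain ⟨h', r', hsp⟩ : ∃ h' r', pvSplitQ t' = h' :: r' := by
      cases hq : pvSplitQ t' with
      | nil => exact absurd hq (pvSplitQ_ne_nil t')
      | cons a b => exact ⟨a, b, rfl⟩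
    by_cases hc : c = '"'
    · rw [hc] at hs
      simp only [pvSplitQ, if_pos] at hs
      cases hs
      rw [hc, hsp, List.append_nil]
      have ihh := ih (i + 1) [] h' r' hsp
      have hctx1 : pvCtx [] (i + 1) = some '"' := by simp [pvCtx]
      rw [hctx1] at ihh
      simp only [List.nil_append] at ihh
      simp only [pvGoB, List.append_assoc, ihh]
      show seg ++ _ = seg ++ pvConv (pvCtx seg i) ('"' :: t')
      simp only [pvConv, if_pos]
      congr 1
      unfold pvCtx
      cases hl : seg.getLast? with
      | some p =>
        simp only [pvOpensO]
        by_cases hm : p ∈ pvOpeners <;> simp [hm]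
      | none =>
        by_cases hi : i = 0
        · simp [hi, pvOpensO]
        · simp only [if_neg hi, pvOpensO]
          have : ('"' ∈ pvOpeners) = False := by decide
          simp [this]
    · simp only [pvSplitQ, if_neg hc, hsp] at hs
      injection hs with hs1 hs2
      subst hs1; subst hs2
      have ihh := ih i (seg ++ [c]) h' r' hsp
      have hctx : pvCtx (seg ++ [c]) i = some c := by simp [pvCtx]
      rw [hctx] at ihh
      have hre : seg ++ c :: h' = (seg ++ [c]) ++ h' := by simp
      rw [hre, ihh]
      simp [pvConv, hc]

lemma pvA_eq_conv (chars : List Char) :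
    (PySem.List.enumerate chars 0).foldl
      (fun acc ic =>
        if ic.2 = '"' then
          acc ++ [if is_opening_context_py chars ic.1 then '\u201c' else '\u201d']
        else acc ++ [ic.2]) []
    = pvConv none chars := by
  have hstep :
      (fun (acc : List Char) (ic : Int × Char) =>
        if ic.2 = '"' then
          acc ++ [if is_opening_context_py chars ic.1 then '\u201c' else '\u201d']
        else acc ++ [ic.2])
      = (fun acc ic => acc ++ [pvA chars ic]) := by
    funext acc ic
    unfold pvA
    split <;> rfl
  rw [hstep, PySem.List.foldl_append_singleton_eq_map, List.nil_append,
    pv_zip_eq, pv_zipmap_conv, pv_conv_newline]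

-- ===== VERDICT (by name: the statement is the Claim_ definition above) =====
theorem apply_curly_double_quotes_py_spec : Claim_equal_apply_curly_double_quotes_py := by
  intro s _
  unfold Spec_apply_curly_double_quotes_py apply_curly_double_quotes_py apply_curly_double_quotes_py_alt
  simp only []
  obtain ⟨p0, rest, hsp⟩ : ∃ p0 rest, pvSplitQ s.toList = p0 :: rest := by
    cases hq : pvSplitQ s.toList with
    | nil => exact absurd hq (pvSplitQ_ne_nil s.toList)
    | cons a b => exact ⟨a, b, rfl⟩
  rw [hsp, pvA_eq_conv]
  have hk := pvK s.toList 0 [] p0 rest hsp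
  simp only [List.nil_append] at hk
  have hctx0 : pvCtx [] 0 = none := by simp [pvCtx]
  rw [hctx0] at hk
  rw [← hk]
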